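-- pv_equiv track=rewrite | github.com/pguerrerolucas/TFG | recommend_courses.py | preprocess_course_history
-- ===== SOURCE A (Python) =====
-- MAX_HISTORY_LENGTH = 10
--
-- def preprocess_course_history(course_ids, max_length=MAX_HISTORY_LENGTH):
--     """Preprocesa el historial de cursos para los modelos."""
--     # Convertir IDs a enteros
--     history = [int(course_id) + 1 for course_id in course_ids]
--
--     # Limitar longitud
--     if len(history) > max_length:
--         history = history[-max_length:]
--
--     # Añadir padding
--     if len(history) < max_length:
--         padded = [0] * (max_length - len(history)) + history
--     else:
--         padded = history
--
--     return padded
-- ===== SOURCE B (Python) =====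
-- MAX_HISTORY_LENGTH = 10
--
-- def preprocess_course_history(course_ids, max_length=MAX_HISTORY_LENGTH):
--     """Preprocesa el historial de cursos para los modelos."""
--     out = []
--     for c in reversed(course_ids):
--         if len(out) == max_length:
--             break
--         out.append(int(c) + 1)
--     while len(out) < max_length:
--         out.append(0)
--     out.reverse()
--     return out
-- ===== Notes on version B (the rewrite author's own statement) =====
-- stated objective: alternative
-- what changed: B builds the fixed-size window directly: one reverse pass that stops after max_length elements, a pad-with-zeros loop, and a final reverse, instead of A's convert-all list comprehension followed by slice-truncate and left-pad branches; B touches only min(n, max_length) input elements.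
-- intended difference: For max_length <= 0 with nonempty course_ids, A returns the whole converted list when max_length == 0 (the [-0:] slice means [0:]) and a front-truncated tail when max_length < 0 (history[-max_length:] drops elements from the front), while B returns the empty/full natural window of that size; a window of size <= 0 holding nothing is the intended reading. — e.g. on preprocess_course_history([1], 0): A returns [2], B returns []
import Mathlib
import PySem

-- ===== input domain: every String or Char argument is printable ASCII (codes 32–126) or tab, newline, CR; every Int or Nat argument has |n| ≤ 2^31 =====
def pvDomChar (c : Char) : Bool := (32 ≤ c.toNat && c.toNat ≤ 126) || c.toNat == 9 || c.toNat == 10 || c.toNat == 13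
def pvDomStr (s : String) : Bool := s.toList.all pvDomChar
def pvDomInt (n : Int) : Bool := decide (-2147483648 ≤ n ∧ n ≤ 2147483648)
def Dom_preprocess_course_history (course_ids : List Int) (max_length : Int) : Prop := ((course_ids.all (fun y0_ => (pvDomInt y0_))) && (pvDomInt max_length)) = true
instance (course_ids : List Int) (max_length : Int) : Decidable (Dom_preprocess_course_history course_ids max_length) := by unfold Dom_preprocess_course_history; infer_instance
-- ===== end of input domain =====

-- B builds the window back-to-front with an early-stopping reverse pass plus a pad loop (alternative decomposition, no slicing/branching on lengths).
-- ===== PORT A =====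
def preprocess_course_history (course_ids : List Int) (max_length : Int) : List Int :=
  let history := course_ids.map (fun course_id => course_id + 1)
  let history :=
    if (history.length : Int) > max_length then
      PySem.List.slice history (some (-max_length)) none
    else history
  if (history.length : Int) < max_length then
    PySem.List.pyRepeat [(0 : Int)] (max_length - (history.length : Int)) ++ history
  else
    history

-- ===== PORT B =====
-- 'for c in reversed(course_ids): if len(out)==max_length: break; out.append(int(c)+1)'
def pvFillRev : List Int → List Int → Int → List Int
  | [], out, _ => out
  | c :: rest, out, k =>
    if (out.length : Int) = k then out else pvFillRev rest (out ++ [c + 1]) k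

-- 'while len(out) < max_length: out.append(0)'
def pvPadUp (out : List Int) (k : Int) : List Int :=
  if (out.length : Int) < k then pvPadUp (out ++ [(0 : Int)]) k else out
termination_by (k - out.length).toNat
decreasing_by simp; omega

def preprocess_course_history_alt (course_ids : List Int) (max_length : Int) : List Int :=
  (pvPadUp (pvFillRev course_ids.reverse [] max_length) max_length).reverse

-- ===== PRECONDITION & SPEC =====
-- For max_length ≤ 0 with nonempty course_ids, A returns the whole converted list when max_length = 0
-- (Python's [-0:] means [0:]) and a front-truncated tail when max_length < 0 (history[-max_length:] drops
-- from the front); B returns the empty window, the intended value for a non-positive window size.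
def D_preprocess_course_history (course_ids : List Int) (max_length : Int) : Prop :=
  max_length ≤ 0 ∧ course_ids ≠ []
instance (course_ids : List Int) (max_length : Int) : Decidable (D_preprocess_course_history course_ids max_length) := by unfold D_preprocess_course_history; infer_instance

def Spec_preprocess_course_history (course_ids : List Int) (max_length : Int) (out : List Int) : Prop := ¬ D_preprocess_course_history course_ids max_length → out = preprocess_course_history_alt course_ids max_length
instance (course_ids : List Int) (max_length : Int) (out : List Int) : Decidable (Spec_preprocess_course_history course_ids max_length out) := by unfold Spec_preprocess_course_history; infer_instance

def pvDiffWitness_preprocess_course_history : List Int × Int := ([1], 0)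
def pvDiffWitnessOut_preprocess_course_history : (List Int) × (List Int) := ([2], [])

-- ===== CLAIM =====
def Claim_unchanged_preprocess_course_history : Prop := ∀ (course_ids : List Int) (max_length : Int), Dom_preprocess_course_history course_ids max_length → Spec_preprocess_course_history course_ids max_length (preprocess_course_history course_ids max_length)
def Claim_changed_preprocess_course_history : Prop := Dom_preprocess_course_history (pvDiffWitness_preprocess_course_history.1) (pvDiffWitness_preprocess_course_history.2) ∧ D_preprocess_course_history (pvDiffWitness_preprocess_course_history.1) (pvDiffWitness_preprocess_course_history.2) ∧ preprocess_course_history (pvDiffWitness_preprocess_course_history.1) (pvDiffWitness_preprocess_course_history.2) = pvDiffWitnessOut_preprocess_course_history.1 ∧ preprocess_course_history_alt (pvDiffWitness_preprocess_course_history.1) (pvDiffWitness_preprocess_course_history.2) = pvDiffWitnessOut_preprocess_course_history.2 ∧ pvDiffWitnessOut_preprocess_course_history.1 ≠ pvDiffWitnessOut_preprocess_course_history.2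
def Claim_exact_preprocess_course_history : Prop := ∀ (course_ids : List Int) (max_length : Int), Dom_preprocess_course_history course_ids max_length → D_preprocess_course_history course_ids max_length → preprocess_course_history course_ids max_length ≠ preprocess_course_history_alt course_ids max_length

-- ===== LEMMAS AND PROOFS =====
lemma pvFillRev_spec (l : List Int) : ∀ (out : List Int) (k : Int), (out.length : Int) ≤ k →
    pvFillRev l out k = out ++ (l.take (k.toNat - out.length)).map (· + 1) := by
  induction l with
  | nil => intro out k h; simp [pvFillRev]
  | cons c rest ih =>
    intro out k h
    by_cases he : (out.length : Int) = k
    · have : k.toNat - out.length = 0 := by omega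
      simp [pvFillRev, he, this]
    · rw [pvFillRev, if_neg he, ih _ k (by simp; omega)]
      have : k.toNat - out.length = (k.toNat - (out.length + 1)) + 1 := by omega
      simp [this, List.take_succ_cons]

lemma pvFillRev_neg (l : List Int) : ∀ (out : List Int) (k : Int), k < 0 →
    pvFillRev l out k = out ++ l.map (· + 1) := by
  induction l with
  | nil => intro out k h; simp [pvFillRev]
  | cons c rest ih =>
    intro out k h
    rw [pvFillRev, if_neg (by omega), ih _ k h]
    simp

lemma pvPadUp_spec (out : List Int) (k : Int) :
    pvPadUp out k = out ++ List.replicate ((k - out.length).toNat) 0 := by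
  by_cases h : (out.length : Int) < k
  · rw [pvPadUp, if_pos h, pvPadUp_spec (out ++ [0]) k]
    have : (k - out.length).toNat = (k - ((out ++ [0]).length)).toNat + 1 := by simp; omega
    simp [this, List.replicate_succ]
  · rw [pvPadUp, if_neg h]
    have : (k - out.length).toNat = 0 := by omega
    simp [this]
termination_by (k - out.length).toNat
decreasing_by simp; omega

-- B's result in closed form, for 0 ≤ max_length.
lemma alt_closed (cids : List Int) (k : Int) (hk : 0 ≤ k) :
    preprocess_course_history_alt cids k =
      List.replicate (k.toNat - min k.toNat cids.length) 0 ++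
        (cids.drop (cids.length - k.toNat)).map (· + 1) := by
  unfold preprocess_course_history_alt
  rw [pvFillRev_spec _ [] k (by simpa using hk)]
  rw [pvPadUp_spec]
  simp [List.take_reverse, List.length_reverse, List.map_reverse]
  omega

-- ===== VERDICT =====
theorem preprocess_course_history_spec : Claim_unchanged_preprocess_course_history := by
  intro cids k _dom hnd
  unfold D_preprocess_course_history at hnd
  by_cases hk : 0 < k
  · rw [alt_closed cids k (le_of_lt hk)]
    unfold preprocess_course_history
    dsimp only
    by_cases h1 : ((cids.map (fun c => c + 1)).length : Int) > k
    · rw [if_pos h1]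
      obtain ⟨m, hm, hmpos⟩ : ∃ m : Nat, k = (m : Int) ∧ 0 < m := ⟨k.toNat, by omega, by omega⟩
      subst hm
      rw [PySem.List.slice_from_neg_natCast _ m hmpos]
      simp only [List.length_map] at h1 ⊢
      have hlen : ((cids.map (fun c => c + 1)).drop (cids.length - m)).length = m := by
        simp; omega
      rw [if_neg (by rw [hlen]; omega)]
      have hmin : (m : Int).toNat - min (m : Int).toNat cids.length = 0 := by
        simp; omega
      rw [hmin]
      simp [List.map_drop]
    · rw [if_neg h1]
      simp only [List.length_map] at h1
      have hd : cids.length - k.toNat = 0 := by omega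
      have hmin : k.toNat - min k.toNat cids.length = (k - cids.length).toNat := by omega
      rw [hd, hmin]
      by_cases h2 : ((cids.map (fun c => c + 1)).length : Int) < k
      · rw [if_pos h2]
        rw [PySem.List.pyRepeat_singleton]
        simp
      · rw [if_neg h2]
        simp only [List.length_map] at h2
        have : (k - (cids.length : Int)).toNat = 0 := by omega
        rw [this]
        simp
  · have hnil : cids = [] := by
      by_contra h; exact hnd ⟨by omega, h⟩
    subst hnil
    by_cases hk0 : 0 ≤ k
    · rw [alt_closed [] k hk0]
      unfold preprocess_course_history
      dsimp only
      rw [if_neg (by simp; omega :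
        ¬ (((List.map (fun course_id => course_id + 1) ([] : List Int)).length : Int) > k))]
      simp [PySem.List.pyRepeat_singleton]
    · unfold preprocess_course_history preprocess_course_history_alt
      dsimp only
      rw [show pvFillRev ([] : List Int).reverse [] k = [] from by simp [pvFillRev]]
      rw [pvPadUp_spec]
      rw [if_pos (by simp; omega :
        (((List.map (fun course_id => course_id + 1) ([] : List Int)).length : Int) > k))]
      rw [PySem.List.slice_from _ (by omega : (0:Int) ≤ -k)]
      rw [if_neg (by simp; omega)]
      simp
      omega

theorem preprocess_course_history_changed : Claim_changed_preprocess_course_history := by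
  unfold Claim_changed_preprocess_course_history
  refine ⟨by decide, by decide, by decide, ?_, by decide⟩
  show preprocess_course_history_alt [1] 0 = []
  unfold preprocess_course_history_alt
  rw [show ([1] : List Int).reverse = [1] from by decide]
  rw [show pvFillRev [1] [] 0 = [] from by rw [pvFillRev]; simp]
  rw [pvPadUp]
  simp

theorem preprocess_course_history_tight : Claim_exact_preprocess_course_history := by
  intro cids k _dom hd heq
  obtain ⟨hk, hne⟩ := hd
  have hn : 0 < cids.length := List.length_pos_of_ne_nil hne
  have hA : (preprocess_course_history cids k).length = cids.length - (-k).toNat := by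
    unfold preprocess_course_history
    dsimp only
    rw [if_pos (by simp; omega :
      ((cids.map (fun course_id => course_id + 1)).length : Int) > k)]
    rw [PySem.List.slice_from _ (by omega : (0:Int) ≤ -k)]
    rw [if_neg ?hc]
    case hc => simp; omega
    simp
  have hlen := congrArg List.length heq
  rw [hA] at hlen
  rcases (by omega : k = 0 ∨ k < 0) with h0 | hkneg
  · subst h0
    have hB : preprocess_course_history_alt cids 0 = [] := by
      unfold preprocess_course_history_alt
      rw [show pvFillRev cids.reverse [] 0 = [] from by
        cases cids.reverse with
        | nil => simp [pvFillRev]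
        | cons a t => simp [pvFillRev]]
      rw [pvPadUp_spec]
      simp
    rw [hB] at hlen
    simp only [List.length_nil, neg_zero, Int.toNat_zero, Nat.sub_zero] at hlen
    omega
  · have hB : (preprocess_course_history_alt cids k).length = cids.length := by
      unfold preprocess_course_history_alt
      rw [pvFillRev_neg _ _ _ hkneg, pvPadUp_spec]
      have : (k - (([] ++ cids.reverse.map (· + 1)).length : Int)).toNat = 0 := by
        simp; omega
      rw [this]
      simp
    rw [hB] at hlen
    omega
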